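-- pv_equiv track=rewrite | github.com/yinxingmaimingg/count_distinct_palindrome | cdp.py | computeLcp
-- ===== SOURCE A (Python) =====
-- def getWordsLcp(u, v):
-- 	l = min(len(u), len(v))
-- 	for i in range(l):
-- 		if (u[i]!=v[i]):
-- 			return i
-- 	return l
--
-- def computeLcp(w):
-- 	lcp = []
-- 	w_ = w[::-1]
-- 	for i in range(len(w)):
-- 		lcp.append([])
-- 		for j in range(len(w)):
-- 			lcp[i].append(getWordsLcp(w[i:], w_[j:]))
-- 	return lcp
-- ===== SOURCE B (Python) =====
-- def computeLcp(w):
--     n = len(w)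
--     w_ = w[::-1]
--     rows = []
--     nxt = [0] * (n + 1)
--     for i in range(n - 1, -1, -1):
--         row = [0] * (n + 1)
--         ci = w[i]
--         for j in range(n - 1, -1, -1):
--             if ci == w_[j]:
--                 row[j] = nxt[j + 1] + 1
--         rows.append(row[:n])
--         nxt = row
--     rows.reverse()
--     return rows
-- ===== Notes on version B (the rewrite author's own statement) =====
-- stated objective: faster
-- what changed: Replaces the per-pair character scan (getWordsLcp on every suffix pair) with a bottom-up DP that fills each row from the next one via lcp[i][j] = lcp[i+1][j+1]+1 when w[i]==rev(w)[j], else 0.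
import Mathlib
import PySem

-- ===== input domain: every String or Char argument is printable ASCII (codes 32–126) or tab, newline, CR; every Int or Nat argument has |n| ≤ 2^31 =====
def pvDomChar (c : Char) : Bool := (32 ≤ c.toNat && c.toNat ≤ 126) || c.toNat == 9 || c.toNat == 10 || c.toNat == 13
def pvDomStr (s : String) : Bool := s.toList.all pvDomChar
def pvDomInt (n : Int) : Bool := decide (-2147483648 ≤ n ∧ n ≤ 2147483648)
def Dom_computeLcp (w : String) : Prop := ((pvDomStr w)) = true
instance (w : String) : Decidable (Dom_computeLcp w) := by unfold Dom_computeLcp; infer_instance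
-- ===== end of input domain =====

-- B replaces A's O(n^3) per-pair suffix scan by the O(n^2) bottom-up DP lcp[i][j] = lcp[i+1][j+1]+1 / 0.

-- ===== PORT A =====
-- getWordsLcp: 'for i in range(l): if u[i]!=v[i]: return i; return l'
def gwlAux (u v : List Char) (l i : Nat) : Int :=
  if i < l then
    if u.getD i default ≠ v.getD i default then (i : Int)
    else gwlAux u v l (i + 1)
  else (l : Int)
termination_by l - i

def getWordsLcp (u v : List Char) : Int :=
  gwlAux u v (min u.length v.length) 0

def computeLcp (w : String) : List (List Int) :=
  let u := w.toList
  let v := u.reverse          -- w_ = w[::-1]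
  (List.range u.length).map (fun i =>
    (List.range u.length).map (fun j =>
      getWordsLcp (u.drop i) (v.drop j)))   -- w[i:], w_[j:]

-- ===== PORT B =====
-- row i (entries j = 0..n-1): row[j] = nxt[j+1]+1 if w[i]==w_[j] else 0;
-- 'ns' is passed already shifted by one (nxt[j+1] = ns[j]), missing entries read as 0.
def rowB (c : Char) : List Char → List Int → List Int
  | [], _ => []
  | d :: v', ns => (if c = d then ns.headD 0 + 1 else 0) :: rowB c v' ns.tail

-- rows built bottom-up: the list of rows for suffixes of u, earliest row first
def tableB (v : List Char) : List Char → List (List Int)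
  | [] => []
  | c :: u' =>
    let rest := tableB v u'
    let nxt := rest.headD (List.replicate v.length 0)
    rowB c v (nxt.drop 1) :: rest

def computeLcp_alt (w : String) : List (List Int) :=
  let u := w.toList
  tableB u.reverse u

-- ===== PRECONDITION & SPEC =====
def Spec_computeLcp (w : String) (out : List (List Int)) : Prop := out = computeLcp_alt w
instance (w : String) (out : List (List Int)) : Decidable (Spec_computeLcp w out) := by unfold Spec_computeLcp; infer_instance

-- ===== CLAIM (what is proved, stated in full; the proofs are below) =====
def Claim_equal_computeLcp : Prop := ∀ (w : String), Dom_computeLcp w → Spec_computeLcp w (computeLcp w)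

-- ===== LEMMAS AND PROOFS =====

-- structural LCP length of two suffixes
def lcpRec : List Char → List Char → Int
  | c :: u', d :: v' => if c = d then lcpRec u' v' + 1 else 0
  | _, _ => 0

-- spec row: entries lcpRec u (v.drop j) for j = 0..|v|-1
def rowSpec (u : List Char) : List Char → List Int
  | [] => []
  | d :: v' => lcpRec u (d :: v') :: rowSpec u v'

theorem lcpRec_nil_left (v : List Char) : lcpRec [] v = 0 := by
  cases v <;> rfl

theorem lcpRec_nil_right (u : List Char) : lcpRec u [] = 0 := by
  cases u <;> rfl

theorem rowSpec_nil (v : List Char) : rowSpec [] v = List.replicate v.length 0 := by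
  induction v with
  | nil => rfl
  | cons d v' ih => simp [rowSpec, lcpRec_nil_left, ih, List.replicate_succ]

theorem rowSpec_headD (u v : List Char) : (rowSpec u v).headD 0 = lcpRec u v := by
  cases v with
  | nil => simp [rowSpec, lcpRec_nil_right]
  | cons d v' => rfl

theorem rowB_spec (c : Char) (u' : List Char) :
    ∀ v : List Char, rowB c v ((rowSpec u' v).drop 1) = rowSpec (c :: u') v := by
  intro v
  induction v with
  | nil => rfl
  | cons d v' ih =>
    show (if c = d then (rowSpec u' v').headD 0 + 1 else 0) :: rowB c v' (rowSpec u' v').tail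
        = lcpRec (c :: u') (d :: v') :: rowSpec (c :: u') v'
    rw [rowSpec_headD]
    have ht : (rowSpec u' v').tail = (rowSpec u' v').drop 1 := by
      cases rowSpec u' v' <;> rfl
    rw [ht, ih]
    rfl

-- spec table: row for each suffix of u
def tabSpec (v : List Char) : List Char → List (List Int)
  | [] => []
  | c :: u' => rowSpec (c :: u') v :: tabSpec v u'

theorem tabSpec_headD (v u : List Char) :
    (tabSpec v u).headD (List.replicate v.length 0) = rowSpec u v := by
  cases u with
  | nil => simp [tabSpec, rowSpec_nil]
  | cons c u' => rfl

theorem tableB_eq_tabSpec (v u : List Char) : tableB v u = tabSpec v u := by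
  induction u with
  | nil => rfl
  | cons c u' ih =>
    show rowB c v (((tableB v u').headD (List.replicate v.length 0)).drop 1) :: tableB v u'
        = tabSpec v (c :: u')
    rw [ih, tabSpec_headD, rowB_spec]
    rfl

-- A's scanner equals the structural LCP
theorem gwlAux_spec (u v : List Char) :
    ∀ (n i : Nat), i ≤ min u.length v.length → min u.length v.length - i = n →
    gwlAux u v (min u.length v.length) i = (i : Int) + lcpRec (u.drop i) (v.drop i) := by
  intro n
  induction n with
  | zero =>
    intro i hi h0
    rw [gwlAux, if_neg (by omega)]
    have hieq : i = min u.length v.length := by omega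
    have hnil : u.drop i = [] ∨ v.drop i = [] := by
      rcases le_total u.length v.length with h | h
      · left; exact List.drop_eq_nil_of_le (by omega)
      · right; exact List.drop_eq_nil_of_le (by omega)
    rcases hnil with h1 | h1
    · rw [hieq] at h1; rw [hieq, h1, lcpRec_nil_left]; simp
    · rw [hieq] at h1; rw [hieq, h1, lcpRec_nil_right]; simp
  | succ n ih =>
    intro i hi h
    have hil : i < min u.length v.length := by omega
    have hiu : i < u.length := by omega
    have hiv : i < v.length := by omega
    rw [gwlAux, if_pos hil]
    have hgu : u.getD i default = u[i] := by
      simp [List.getD_eq_getElem?_getD, List.getElem?_eq_getElem hiu]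
    have hgv : v.getD i default = v[i] := by
      simp [List.getD_eq_getElem?_getD, List.getElem?_eq_getElem hiv]
    rw [hgu, hgv, List.drop_eq_getElem_cons hiu, List.drop_eq_getElem_cons hiv]
    by_cases hc : u[i] = v[i]
    · rw [if_neg (by simpa using hc)]
      rw [ih (i + 1) (by omega) (by omega)]
      rw [show lcpRec (u[i] :: u.drop (i + 1)) (v[i] :: v.drop (i + 1))
            = lcpRec (u.drop (i + 1)) (v.drop (i + 1)) + 1 from by simp [lcpRec, hc]]
      push_cast
      ring_nf
    · rw [if_pos hc]
      simp [lcpRec, hc]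

theorem getWordsLcp_eq_lcpRec (u v : List Char) : getWordsLcp u v = lcpRec u v := by
  have := gwlAux_spec u v (min u.length v.length) 0 (Nat.zero_le _) rfl
  simpa [getWordsLcp] using this

theorem range_map_rowSpec (u : List Char) :
    ∀ v : List Char, (List.range v.length).map (fun j => lcpRec u (v.drop j)) = rowSpec u v := by
  intro v
  induction v with
  | nil => rfl
  | cons d v' ih =>
    simp only [List.length_cons, List.range_succ_eq_map, List.map_cons, List.map_map]
    congr 1

theorem range_map_tabSpec (v : List Char) (f : List Char → List Int)
    (hf : ∀ s, f s = rowSpec s v) :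
    ∀ u : List Char, (List.range u.length).map (fun i => f (u.drop i)) = tabSpec v u := by
  intro u
  induction u with
  | nil => rfl
  | cons c u' ih =>
    simp only [List.length_cons, List.range_succ_eq_map, List.map_cons, List.map_map, tabSpec]
    congr 1
    exact hf _

-- ===== VERDICT (by name: the statement is the Claim_ definition above) =====
theorem computeLcp_spec : Claim_equal_computeLcp := by
  intro w _
  unfold Spec_computeLcp computeLcp computeLcp_alt
  set u := w.toList
  set v := u.reverse with hv
  rw [tableB_eq_tabSpec]
  have hlen : u.length = v.length := by simp [hv]
  calc (List.range u.length).map (fun i => (List.range u.length).map (fun j => getWordsLcp (u.drop i) (v.drop j)))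
      = (List.range u.length).map (fun i => rowSpec (u.drop i) v) := by
        apply List.map_congr_left
        intro i _
        rw [hlen]
        have := range_map_rowSpec (u.drop i) v
        rw [← this]
        apply List.map_congr_left
        intro j _
        rw [getWordsLcp_eq_lcpRec]
    _ = tabSpec v u := range_map_tabSpec v (fun s => rowSpec s v) (fun _ => rfl) u
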